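-- pv_equiv track=rewrite | github.com/kphowell/odin-utils | odinclean.py | bit_merge
-- ===== SOURCE A (Python) =====
-- def bit_merge(a, b):
--     """
--     Merge two strings on whitespace by converting whitespace to the
--     null character, then AND'ing the bit strings of a and b, then
--     convert back to regular strings (with spaces).
--     """
--     if len(b) > len(a): return bit_merge(b, a)
--     try:
--         # get bit vectors with nulls instead of spaces, and
--         # make sure the strings are the same length
--         a = a.replace(' ','\0').encode('utf-8')
--         b = b.replace(' ','\0').encode('utf-8').ljust(len(a), b'\0')
--         c_pairs = zip(a, b)
--     except UnicodeDecodeError: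
--         return None
--     c = []
--     for c1, c2 in c_pairs:
--         # only merge if they merge cleanly
--         if c1 != 0 and c2 != 0:
--             return None
--         else:
--             c.append(c1|c2)
--     try:
--         return bytes(c).decode('utf-8').replace('\0',' ').rstrip(' ')
--     except UnicodeDecodeError:
--         return None
-- ===== SOURCE B (Python) =====
-- def bit_merge(a, b):
--     """Character-level merge: at each position keep the non-space character,
--     padding the shorter string with spaces; conflict -> None."""
--     if len(b) > len(a):
--         a, b = b, a
--     out = []
--     for i, ch in enumerate(a):
--         d = b[i] if i < len(b) else ' '
--         if ch == ' ':
--             out.append(d)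
--         elif d == ' ':
--             out.append(ch)
--         else:
--             return None
--     return ''.join(out).rstrip(' ')
-- ===== Notes on version B (the rewrite author's own statement) =====
-- stated objective: simpler
-- what changed: B drops the whole bytes pipeline (replace-with-NUL, utf-8 encode, ljust, zip, bitwise OR, decode, replace back): it walks the characters once, keeping at each position the non-space character of the two (padding the shorter string with spaces) and returning None on a conflict.
import Mathlib
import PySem

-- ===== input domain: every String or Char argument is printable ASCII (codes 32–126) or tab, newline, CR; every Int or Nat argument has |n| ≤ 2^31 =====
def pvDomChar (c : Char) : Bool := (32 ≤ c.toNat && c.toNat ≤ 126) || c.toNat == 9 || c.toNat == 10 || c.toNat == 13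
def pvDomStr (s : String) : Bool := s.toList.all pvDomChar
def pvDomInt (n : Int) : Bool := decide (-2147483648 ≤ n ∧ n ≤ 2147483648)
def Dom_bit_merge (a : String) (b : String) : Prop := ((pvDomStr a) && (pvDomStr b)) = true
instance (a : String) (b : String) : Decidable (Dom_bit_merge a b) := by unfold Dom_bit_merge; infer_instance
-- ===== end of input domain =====

-- B replaces A's bytes pipeline (NUL-substitute, encode, ljust, zip, bitwise OR, decode)
-- by a single character-level pass keeping the non-space character at each position;
-- objective: simpler. Equivalence is proved on the ASCII domain above, where one char = one byte.

-- ===== PORT A =====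
-- shared primitive: Python str.rstrip(' ') (strips SPACES only), used by both sources
def pyRstripSpace (l : List Char) : List Char := (l.reverse.dropWhile (· == ' ')).reverse

-- a.replace(' ','\0').encode('utf-8'): exact on the ASCII domain (one byte per char)
def bmEnc (s : List Char) : List Nat := s.map (fun c => if c == ' ' then 0 else c.toNat)

-- the for-loop over c_pairs with early return None
def bmLoop : List (Nat × Nat) → List Nat → Option (List Nat)
  | [], acc => some acc
  | (c1, c2) :: rest, acc =>
      if c1 ≠ 0 ∧ c2 ≠ 0 then none else bmLoop rest (acc ++ [c1 ||| c2])

-- bytes(c).decode('utf-8').replace('\0',' '): exact on the ASCII domain, where the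
-- decode cannot raise (every merged byte is an ASCII code or 0), so the except branch is dead
def bmDec (c : List Nat) : List Char :=
  (c.map Char.ofNat).map (fun ch => if ch == Char.ofNat 0 then ' ' else ch)

def bmBody (a b : List Char) : Option String :=
  let ab := bmEnc a
  let bb := bmEnc b ++ List.replicate (ab.length - (bmEnc b).length) 0   -- .ljust(len(a), b'\0')
  match bmLoop (ab.zip bb) [] with
  | none => none
  | some c => some (String.mk (pyRstripSpace (bmDec c)))

def bit_merge (a : String) (b : String) : Option String :=
  if b.toList.length > a.toList.length then bmBody b.toList a.toList
  else bmBody a.toList b.toList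

-- ===== PORT B =====
-- the for-loop over enumerate(a) with d = b[i] if i < len(b) else ' '
def bmAltLoop : List Char → List Char → List Char → Option (List Char)
  | acc, [], _ => some acc
  | acc, x :: xs, bs =>
      let d := bs.headD ' '
      if x == ' ' then bmAltLoop (acc ++ [d]) xs bs.tail
      else if d == ' ' then bmAltLoop (acc ++ [x]) xs bs.tail
      else none

def bit_merge_alt (a : String) (b : String) : Option String :=
  let p := if b.toList.length > a.toList.length then (b, a) else (a, b)
  match bmAltLoop [] p.1.toList p.2.toList with
  | none => none
  | some out => some (String.mk (pyRstripSpace out))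

-- ===== PRECONDITION & SPEC =====
def Spec_bit_merge (a : String) (b : String) (out : Option String) : Prop := out = bit_merge_alt a b
instance (a : String) (b : String) (out : Option String) : Decidable (Spec_bit_merge a b out) := by unfold Spec_bit_merge; infer_instance

-- ===== CLAIM (what is proved, stated in full; the proofs are below) =====
def Claim_equal_bit_merge : Prop := ∀ (a : String) (b : String), Dom_bit_merge a b → Spec_bit_merge a b (bit_merge a b)

-- ===== LEMMAS AND PROOFS =====

lemma domChar_toNat_ne_zero {c : Char} (h : pvDomChar c = true) : c.toNat ≠ 0 := by
  simp [pvDomChar] at h; omega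

lemma beq_nul_eq_false {x : Char} (hx0 : x.toNat ≠ 0) : (x == Char.ofNat 0) = false := by
  simp only [beq_eq_false_iff_ne, ne_eq]
  rintro rfl
  exact hx0 (by decide)

lemma bmDec_enc {l : List Char} (h : l.all pvDomChar) : bmDec (bmEnc l) = l := by
  induction l with
  | nil => rfl
  | cons x xs ih =>
    simp only [List.all_cons, Bool.and_eq_true] at h
    have hxs := ih h.2
    simp only [bmEnc, bmDec, List.map_cons] at hxs ⊢
    refine congrArg₂ List.cons ?_ hxs
    by_cases hsp : x = ' '
    · subst hsp; simp
    · have hx0 : x.toNat ≠ 0 := domChar_toNat_ne_zero h.1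
      have hbeq : (x == ' ') = false := by simp [hsp]
      rw [hbeq]
      simp only [if_false, Bool.false_eq_true]
      rw [Char.ofNat_toNat, beq_nul_eq_false hx0]
      simp

lemma bmEnc_nil : bmEnc [] = [] := rfl

lemma bmEnc_cons (x : Char) (l : List Char) :
    bmEnc (x :: l) = (if x == ' ' then 0 else x.toNat) :: bmEnc l := rfl

lemma bmEnc_append (l₁ l₂ : List Char) : bmEnc (l₁ ++ l₂) = bmEnc l₁ ++ bmEnc l₂ := by
  simp [bmEnc]

lemma bmAltLoop_dom {as : List Char} : ∀ {bs acc out : List Char},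
    as.all pvDomChar → bs.all pvDomChar → acc.all pvDomChar →
    bmAltLoop acc as bs = some out → out.all pvDomChar := by
  induction as with
  | nil =>
    intro bs acc out _ _ hacc heq
    simp only [bmAltLoop, Option.some.injEq] at heq
    exact heq ▸ hacc
  | cons x xs ih =>
    intro bs acc out ha hb hacc heq
    simp only [List.all_cons, Bool.and_eq_true] at ha
    have hd : pvDomChar (bs.headD ' ') = true := by
      cases bs with
      | nil => decide
      | cons y ys => simp only [List.all_cons, Bool.and_eq_true] at hb; exact hb.1
    have ht : bs.tail.all pvDomChar := by
      cases bs with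
      | nil => decide
      | cons y ys => simp only [List.all_cons, Bool.and_eq_true] at hb; exact hb.2
    rw [bmAltLoop] at heq
    split_ifs at heq with h1 h2
    · refine ih ha.2 ht ?_ heq
      simp [List.all_append, hacc]
      simpa using hd
    · refine ih ha.2 ht ?_ heq
      simp [List.all_append, hacc, ha.1]

lemma bmLoop_eq (as : List Char) : ∀ (bs acc : List Char), bs.length ≤ as.length →
    as.all pvDomChar → bs.all pvDomChar →
    bmLoop ((bmEnc as).zip (bmEnc bs ++ List.replicate (as.length - bs.length) 0)) (bmEnc acc)
      = Option.map bmEnc (bmAltLoop acc as bs) := by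
  induction as with
  | nil =>
    intro bs acc hlen _ _
    have : bs = [] := List.eq_nil_of_length_eq_zero (Nat.le_zero.mp hlen)
    subst this
    rfl
  | cons x xs ih =>
    intro bs acc hlen ha hb
    simp only [List.all_cons, Bool.and_eq_true] at ha
    cases bs with
    | nil =>
      have hlen2 : (x :: xs).length - ([] : List Char).length = xs.length - ([] : List Char).length + 1 := by
        simp
      rw [bmEnc_cons, bmEnc_nil, List.nil_append, hlen2, List.replicate_succ,
        List.zip_cons_cons]
      rw [show bmAltLoop acc (x :: xs) [] = if (x == ' ') then bmAltLoop (acc ++ [' ']) xs []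
            else bmAltLoop (acc ++ [x]) xs [] from rfl]
      by_cases hx : x = ' '
      · subst hx
        rw [show (if (' ' == ' ') then (0 : Nat) else (' ').toNat) = 0 from rfl]
        simp only [bmLoop]
        rw [if_neg (by simp), Nat.or_zero, if_pos (show (' ' == ' ') = true from rfl)]
        rw [show bmEnc acc ++ [(0 : Nat)] = bmEnc (acc ++ [' ']) from by
          rw [bmEnc_append]; rfl]
        have h := ih [] (acc ++ [' ']) (by simp) ha.2 (by decide)
        rw [bmEnc_nil, List.nil_append] at h
        exact h
      · have hxb : (x == ' ') = false := by simp [hx]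
        rw [hxb]
        simp only [Bool.false_eq_true, if_false]
        simp only [bmLoop]
        rw [if_neg (by simp), Nat.or_zero]
        rw [show bmEnc acc ++ [x.toNat] = bmEnc (acc ++ [x]) from by
          rw [bmEnc_append, bmEnc_cons, bmEnc_nil, hxb]
          simp]
        have h := ih [] (acc ++ [x]) (by simp) ha.2 (by decide)
        rw [bmEnc_nil, List.nil_append] at h
        exact h
    | cons y ys =>
      simp only [List.all_cons, Bool.and_eq_true] at hb
      have hlen' : ys.length ≤ xs.length := by simpa using hlen
      have hsub : (x :: xs).length - (y :: ys).length = xs.length - ys.length := by simp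
      rw [bmEnc_cons, bmEnc_cons y, List.cons_append, hsub, List.zip_cons_cons]
      rw [show bmAltLoop acc (x :: xs) (y :: ys) = if (x == ' ') then bmAltLoop (acc ++ [y]) xs ys
            else if (y == ' ') then bmAltLoop (acc ++ [x]) xs ys else none from rfl]
      by_cases hx : x = ' ' <;> by_cases hy : y = ' '
      · subst hx; subst hy
        rw [show (if (' ' == ' ') then (0 : Nat) else (' ').toNat) = 0 from rfl]
        simp only [bmLoop]
        rw [if_neg (by simp), Nat.zero_or, if_pos (show (' ' == ' ') = true from rfl)]
        rw [show bmEnc acc ++ [(0 : Nat)] = bmEnc (acc ++ [' ']) from by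
          rw [bmEnc_append]; rfl]
        exact ih ys (acc ++ [' ']) hlen' ha.2 hb.2
      · subst hx
        have hyb : (y == ' ') = false := by simp [hy]
        rw [show (if (' ' == ' ') then (0 : Nat) else (' ').toNat) = 0 from rfl, hyb]
        simp only [Bool.false_eq_true, if_false]
        simp only [bmLoop]
        rw [if_neg (by simp), Nat.zero_or, if_pos (show (' ' == ' ') = true from rfl)]
        rw [show bmEnc acc ++ [y.toNat] = bmEnc (acc ++ [y]) from by
          rw [bmEnc_append, bmEnc_cons, bmEnc_nil, hyb]
          simp]
        exact ih ys (acc ++ [y]) hlen' ha.2 hb.2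
      · subst hy
        have hxb : (x == ' ') = false := by simp [hx]
        rw [show (if (' ' == ' ') then (0 : Nat) else (' ').toNat) = 0 from rfl, hxb]
        simp only [Bool.false_eq_true, if_false]
        rw [if_pos (show (' ' == ' ') = true from rfl)]
        simp only [bmLoop]
        rw [if_neg (by simp), Nat.or_zero]
        rw [show bmEnc acc ++ [x.toNat] = bmEnc (acc ++ [x]) from by
          rw [bmEnc_append, bmEnc_cons, bmEnc_nil, hxb]
          simp]
        exact ih ys (acc ++ [x]) hlen' ha.2 hb.2
      · have hxb : (x == ' ') = false := by simp [hx]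
        have hyb : (y == ' ') = false := by simp [hy]
        have hx0 : x.toNat ≠ 0 := domChar_toNat_ne_zero ha.1
        have hy0 : y.toNat ≠ 0 := domChar_toNat_ne_zero hb.1
        rw [hxb, hyb]
        simp only [Bool.false_eq_true, if_false]
        simp only [bmLoop]
        rw [if_pos ⟨hx0, hy0⟩]
        rfl

lemma bmBody_eq (as bs : List Char) (hlen : bs.length ≤ as.length)
    (ha : as.all pvDomChar) (hb : bs.all pvDomChar) :
    bmBody as bs = (match bmAltLoop [] as bs with
      | none => none
      | some out => some (String.mk (pyRstripSpace out))) := by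
  have key := bmLoop_eq as bs [] hlen ha hb
  have h0 : bmEnc ([] : List Char) = [] := rfl
  rw [h0] at key
  have hl1 : (bmEnc as).length = as.length := by simp [bmEnc]
  have hl2 : (bmEnc bs).length = bs.length := by simp [bmEnc]
  simp only [bmBody]
  rw [hl1, hl2, key]
  cases h : bmAltLoop [] as bs with
  | none => rfl
  | some out =>
    have hout : out.all pvDomChar := bmAltLoop_dom ha hb (by decide) h
    simp [bmDec_enc hout]
-- ===== VERDICT (by name: the statement is the Claim_ definition above) =====
theorem bit_merge_spec : Claim_equal_bit_merge := by
  intro a b hdom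
  have ha : a.toList.all pvDomChar := by
    simp [Dom_bit_merge, pvDomStr] at hdom; exact (List.all_eq_true).2 hdom.1
  have hb : b.toList.all pvDomChar := by
    simp [Dom_bit_merge, pvDomStr] at hdom; exact (List.all_eq_true).2 hdom.2
  unfold Spec_bit_merge bit_merge bit_merge_alt
  by_cases h : b.toList.length > a.toList.length
  · simp only [h, if_pos]
    exact bmBody_eq _ _ (by omega) hb ha
  · simp only [h]
    exact bmBody_eq _ _ (by omega) ha hb
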